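-- pv_equiv track=rewrite | github.com/oscaratnc/HackerRanks | HackerRanks/Build_a_string/build_a_string2.py | build_a_string
-- ===== SOURCE A (Python) =====
-- def build_a_string(a,b,s):
--     cost = a
--     i = 1
--     match = ""
--     while i < len(s):
--         sub_st = s[:i]
--         for j in range(i+1,len(s)+1):
--             if s[i:j] not in s[:i]:
--                 if j == len(s)+1:
--                     match = s[i:j]
--                 else:
--                     match = s[i:j-1]
--                 break
--             match = s[i:j]
--         if a*len(match) > b:
--             cost += b
--             i += len(match)
--         else:
--             cost += a
--             i += 1
--     return cost
-- ===== SOURCE B (Python) =====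
-- def build_a_string(a, b, s):
--     # Different algorithm: precompute lcp(p, i) = longest common prefix of the
--     # suffixes s[p:] and s[i:] by dynamic programming (rows built bottom-up),
--     # then the longest substring of s[:i] matching at i is max over p < i of
--     # min(lcp(p, i), i - p); the greedy cost walk uses that table directly.
--     n = len(s)
--     rows = [[0] * (n + 1)]          # row for p = n
--     for p in range(n - 1, -1, -1):
--         c = s[p]
--         prev = rows[0]
--         row = [x + 1 if c == ci else 0 for ci, x in zip(s, prev[1:])]
--         row.append(0)
--         rows.insert(0, row)
--     cost = a
--     i = 1
--     while i < n:
--         k = 0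
--         for p in range(i):
--             m = rows[p][i]
--             if m > i - p:
--                 m = i - p
--             if m > k:
--                 k = m
--         if a * k > b:
--             cost += b
--             i += k
--         else:
--             cost += a
--             i += 1
--     return cost
-- ===== Notes on version B (the rewrite author's own statement) =====
-- stated objective: alternative
-- what changed: Replaces the per-position extend-and-substring-search scan (s[i:j] in s[:i] for growing j) by a precomputed suffix-LCP dynamic-programming table from which the longest reusable match at i is read off as max over p<i of min(lcp(p,i), i-p); fewer asymptotic character comparisons in the worst case, but not measurably faster in practice since CPython's substring search runs at C speed.
import Mathlib
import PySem

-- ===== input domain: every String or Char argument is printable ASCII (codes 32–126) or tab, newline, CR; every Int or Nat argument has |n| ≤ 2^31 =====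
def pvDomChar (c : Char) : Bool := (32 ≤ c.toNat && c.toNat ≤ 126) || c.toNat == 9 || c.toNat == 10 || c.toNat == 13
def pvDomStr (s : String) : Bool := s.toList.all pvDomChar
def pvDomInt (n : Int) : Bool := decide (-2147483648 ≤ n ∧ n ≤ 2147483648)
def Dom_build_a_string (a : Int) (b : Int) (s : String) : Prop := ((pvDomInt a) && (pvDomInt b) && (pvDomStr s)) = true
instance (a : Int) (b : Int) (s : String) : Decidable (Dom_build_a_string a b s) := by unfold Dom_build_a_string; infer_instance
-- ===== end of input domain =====

-- B replaces A's per-position extend-and-substring-search by a precomputed suffix-LCP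
-- DP table (alternative algorithm, O(n^2) worst case); return values proved equal on all inputs.

-- ===== PORT A =====
-- s[i:j] for 0 ≤ i ≤ j (exact: Python's slice with nonnegative bounds clamps the same way)
def pvSlice (t : List Char) (i j : Nat) : List Char := (t.take j).drop i

-- the inner `for j in range(i+1, len(s)+1)` loop of A, carrying `match` (returned if the range is exhausted without break)
def pvInnerA (t : List Char) (i : Nat) (j : Nat) (m : List Char) : List Char :=
  if h : j < t.length + 1 then
    if PySem.Chars.isIn (pvSlice t i j) (t.take i) = false then
      (if j = t.length + 1 then pvSlice t i j else pvSlice t i (j - 1))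
    else pvInnerA t i (j + 1) (pvSlice t i j)
  else m
termination_by t.length + 1 - j

-- the outer while loop; fuel = len(s)+1 makes the port total (when b < 0 the Python loop can fail to advance i and diverge; the two fuelled ports still step identically and agree)
def pvLoopA (a b : Int) (t : List Char) : Nat → Int → Nat → List Char → Int
  | 0, cost, _, _ => cost
  | fuel + 1, cost, i, m =>
    if i < t.length then
      let m' := pvInnerA t i (i + 1) m
      if a * (m'.length : Int) > b then pvLoopA a b t fuel (cost + b) (i + m'.length) m'
      else pvLoopA a b t fuel (cost + a) (i + 1) m'
    else cost

def build_a_string (a : Int) (b : Int) (s : String) : Int :=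
  pvLoopA a b s.toList (s.toList.length + 1) a 1 []

-- ===== PORT B =====
-- row = [x + 1 if c == ci else 0 for ci, x in zip(s, prev[1:])]; row.append(0)
def pvMkRow (t : List Char) (c : Char) (prev : List Nat) : List Nat :=
  ((t.zip prev.tail).map (fun q => if c = q.1 then q.2 + 1 else 0)) ++ [0]

-- `rows = [[0]*(n+1)]; for p in range(n-1,-1,-1): rows.insert(0, mkRow(s[p], rows[0]))`
-- as recursion on the remaining prefix chars (argument u = s[p:]), state = rows built so far
def pvRows (t : List Char) : List Char → List (List Nat)
  | [] => [List.replicate (t.length + 1) 0]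
  | c :: cs => pvMkRow t c ((pvRows t cs).headD []) :: pvRows t cs

-- `k = 0; for p in range(i): m = rows[p][i]; if m > i-p: m = i-p; if m > k: k = m`
def pvKmax (rows : List (List Nat)) (i : Nat) : Nat :=
  (List.range i).foldl (fun k p =>
    let m := (rows.getD p []).getD i 0
    let m := if m > i - p then i - p else m
    if m > k then m else k) 0

def pvLoopB (a b : Int) (t : List Char) (rows : List (List Nat)) : Nat → Int → Nat → Int
  | 0, cost, _ => cost
  | fuel + 1, cost, i =>
    if i < t.length then
      let k := pvKmax rows i
      if a * (k : Int) > b then pvLoopB a b t rows fuel (cost + b) (i + k)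
      else pvLoopB a b t rows fuel (cost + a) (i + 1)
    else cost

def build_a_string_alt (a : Int) (b : Int) (s : String) : Int :=
  pvLoopB a b s.toList (pvRows s.toList s.toList) (s.toList.length + 1) a 1

-- ===== PRECONDITION & SPEC =====
def Spec_build_a_string (a : Int) (b : Int) (s : String) (out : Int) : Prop := out = build_a_string_alt a b s
instance (a : Int) (b : Int) (s : String) (out : Int) : Decidable (Spec_build_a_string a b s out) := by unfold Spec_build_a_string; infer_instance

-- ===== CLAIM (what is proved, stated in full; the proofs are below) =====
def Claim_equal_build_a_string : Prop := ∀ (a : Int) (b : Int) (s : String), Dom_build_a_string a b s → Spec_build_a_string a b s (build_a_string a b s)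

-- ===== LEMMAS AND PROOFS =====

-- longest common prefix length of two lists
def lcpLen : List Char → List Char → Nat
  | a :: as, b :: bs => if a = b then lcpLen as bs + 1 else 0
  | _, _ => 0

theorem lcpLen_nil_left (v : List Char) : lcpLen [] v = 0 := rfl

theorem lcpLen_nil_right (u : List Char) : lcpLen u [] = 0 := by cases u <;> rfl

theorem lcpLen_le_left : ∀ (u v : List Char), lcpLen u v ≤ u.length
  | [], _ => by simp [lcpLen]
  | _ :: _, [] => by simp [lcpLen_nil_right]
  | a :: as, b :: bs => by
    by_cases h : a = b
    · have := lcpLen_le_left as bs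
      simp only [lcpLen, if_pos h, List.length_cons]
      omega
    · simp [lcpLen, h]

theorem lcpLen_le_right : ∀ (u v : List Char), lcpLen u v ≤ v.length
  | [], _ => by simp [lcpLen]
  | _ :: _, [] => by simp [lcpLen_nil_right]
  | a :: as, b :: bs => by
    by_cases h : a = b
    · have := lcpLen_le_right as bs
      simp only [lcpLen, if_pos h, List.length_cons]
      omega
    · simp [lcpLen, h]

theorem take_eq_of_le_lcpLen : ∀ (u v : List Char) (L : Nat), L ≤ lcpLen u v → u.take L = v.take L
  | _, _, 0, _ => by simp
  | [], v, L + 1, h => by simp [lcpLen] at h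
  | _ :: _, [], L + 1, h => by simp [lcpLen_nil_right] at h
  | a :: as, b :: bs, L + 1, h => by
    by_cases hab : a = b
    · have h' : L ≤ lcpLen as bs := by
        simp only [lcpLen, if_pos hab] at h; omega
      simp [hab, take_eq_of_le_lcpLen as bs L h']
    · simp [lcpLen, hab] at h

theorem le_lcpLen_of_take_eq : ∀ (L : Nat) (u v : List Char),
    u.take L = v.take L → L ≤ u.length → L ≤ lcpLen u v
  | 0, _, _, _, _ => Nat.zero_le _
  | L + 1, [], _, _, hlen => by simp at hlen
  | L + 1, a :: as, v, htake, hlen => by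
    cases v with
    | nil => simp at htake
    | cons b bs =>
      simp only [List.take_succ_cons, List.cons.injEq] at htake
      have h' : L ≤ lcpLen as bs :=
        le_lcpLen_of_take_eq L as bs htake.2 (by simpa using hlen)
      simp only [lcpLen, if_pos htake.1]
      omega

-- the common specification: s[i:i+L] occurs inside s[:i] (reducible so that
-- Nat.findGreatest finds the Decidable instance of the infix relation)
@[reducible] def pvP (t : List Char) (i L : Nat) : Prop := ((t.drop i).take L) <:+: t.take i

-- the greatest admissible match length at position i
def pvMM (t : List Char) (i : Nat) : Nat := Nat.findGreatest (pvP t i) (t.length - i)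

theorem pvP_mono (t : List Char) (i : Nat) {L1 L2 : Nat} (h : L1 ≤ L2) (hP : pvP t i L2) :
    pvP t i L1 := by
  unfold pvP at *
  have h1 : (t.drop i).take L1 = ((t.drop i).take L2).take L1 := by
    rw [List.take_take, Nat.min_eq_left h]
  rw [h1]
  exact (List.take_prefix _ _).isInfix.trans hP

theorem pvSlice_eq (t : List Char) (i j : Nat) : pvSlice t i j = (t.drop i).take (j - i) := by
  simp [pvSlice, List.drop_take]

-- A's inner scan characterised: the result has the greatest admissible length
theorem innerA_aux (t : List Char) (i : Nat) (hi : i < t.length) :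
    ∀ (d j : Nat) (m : List Char), t.length + 1 - j ≤ d → i + 1 ≤ j → j ≤ t.length + 1 →
      (∀ L, L ≤ j - 1 - i → pvP t i L) →
      (m = (t.drop i).take (j - 1 - i) ∨ j = i + 1) →
      (pvInnerA t i j m).length = pvMM t i := by
  intro d
  induction d with
  | zero =>
    intro j m hd hj1 hj2 hP hm
    have hjev : j = t.length + 1 := by omega
    rw [pvInnerA, dif_neg (by omega)]
    have hm' : m = (t.drop i).take (t.length - i) := by
      rcases hm with h | h
      · rw [h, hjev]; congr 1
      · omega
    have hmm : pvMM t i = t.length - i :=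
      Nat.findGreatest_eq (hP (t.length - i) (by omega))
    rw [hm', hmm, List.length_take, List.length_drop]
    omega
  | succ d ih =>
    intro j m hd hj1 hj2 hP hm
    rw [pvInnerA]
    by_cases hlt : j < t.length + 1
    · rw [dif_pos hlt]
      by_cases hin : PySem.Chars.isIn (pvSlice t i j) (t.take i) = false
      · rw [if_pos hin, if_neg (by omega)]
        have hnotP : ¬ pvP t i (j - i) := by
          rw [PySem.Chars.isIn_eq_false_iff, pvSlice_eq] at hin
          exact hin
        have hmm : pvMM t i = j - 1 - i := by
          apply Nat.findGreatest_eq_iff.2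
          refine ⟨by omega, fun _ => hP _ le_rfl, ?_⟩
          intro L hL hLb hPL
          exact hnotP (pvP_mono t i (by omega) hPL)
        rw [hmm, pvSlice_eq, List.length_take, List.length_drop]
        omega
      · rw [if_neg hin]
        have hPj : pvP t i (j - i) := by
          have h1 : PySem.Chars.isIn (pvSlice t i j) (t.take i) = true := by
            cases h : PySem.Chars.isIn (pvSlice t i j) (t.take i)
            · exact absurd h hin
            · rfl
          rw [PySem.Chars.isIn_iff_infix, pvSlice_eq] at h1
          exact h1
        refine ih (j + 1) (pvSlice t i j) (by omega) (by omega) (by omega) ?_ ?_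
        · intro L hL
          rcases Nat.lt_or_ge L (j - i) with h | h
          · exact hP L (by omega)
          · have hLe : L = j - i := by omega
            rw [hLe]; exact hPj
        · left; rw [pvSlice_eq]; congr 1
    · rw [dif_neg hlt]
      have hjev : j = t.length + 1 := by omega
      have hm' : m = (t.drop i).take (t.length - i) := by
        rcases hm with h | h
        · rw [h, hjev]; congr 1
        · omega
      have hmm : pvMM t i = t.length - i :=
        Nat.findGreatest_eq (hP (t.length - i) (by omega))
      rw [hm', hmm, List.length_take, List.length_drop]
      omega

-- B's table rows are exactly the suffix-lcp values
theorem rows_eq (t : List Char) : ∀ u : List Char,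
    pvRows t u = u.tails.map (fun v => (List.range (t.length + 1)).map (fun idx => lcpLen v (t.drop idx))) := by
  intro u
  induction u with
  | nil =>
    rw [pvRows, show List.tails ([] : List Char) = [[]] from rfl, List.map_cons, List.map_nil]
    congr 1
    apply List.ext_getElem
    · simp
    · intro idx h1 h2
      simp [lcpLen_nil_left]
  | cons c cs ih =>
    simp only [pvRows, ih, List.tails_cons, List.map_cons]
    congr 1
    have hhead : ((cs.tails.map (fun v => (List.range (t.length + 1)).map
        (fun idx => lcpLen v (t.drop idx)))).headD []) =
        (List.range (t.length + 1)).map (fun idx => lcpLen cs (t.drop idx)) := by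
      cases cs with
      | nil =>
        rw [show List.tails ([] : List Char) = [[]] from rfl]
        rfl
      | cons x xs =>
        rw [List.tails_cons]
        rfl
    rw [hhead]
    -- pvMkRow t c (row for cs) = row for c :: cs
    apply List.ext_getElem
    · simp [pvMkRow]
    · intro idx h1 h2
      have hlen : ((t.zip ((List.range (t.length + 1)).map
          (fun idx => lcpLen cs (t.drop idx))).tail).map
          (fun q => if c = q.1 then q.2 + 1 else 0)).length = t.length := by
        simp [List.length_zip]
      have hidx : idx < t.length + 1 := by simpa using h2
      rcases Nat.lt_or_ge idx t.length with hlt | hge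
      · have htail : ((List.range (t.length + 1)).map
            (fun idx => lcpLen cs (t.drop idx))).tail =
            (List.range t.length).map (fun idx => lcpLen cs (t.drop (idx + 1))) := by
          rw [List.range_succ_eq_map]
          simp [List.map_map, Function.comp_def, Nat.succ_eq_add_one]
        simp only [pvMkRow]
        rw [List.getElem_append_left (by rw [hlen]; exact hlt)]
        simp only [htail, List.getElem_map, List.getElem_zip, List.getElem_range]
        rw [List.drop_eq_getElem_cons hlt]
        simp [lcpLen]
      · have hidx' : idx = t.length := by omega
        subst hidx'
        simp only [pvMkRow]
        rw [List.getElem_append_right (by rw [hlen])]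
        rw [List.getElem_map, List.getElem_range]
        simp [hlen, List.drop_length, lcpLen_nil_right]

-- B's inner fold computes the same greatest admissible length
theorem kmax_eq (t : List Char) (i : Nat) (hi : i < t.length) :
    pvKmax (pvRows t t) i = pvMM t i := by
  have hrows : ∀ p, p < i → (( (pvRows t t).getD p []).getD i 0) =
      lcpLen (t.drop p) (t.drop i) := by
    intro p hp
    rw [rows_eq]
    have hp' : p < t.tails.length := by simp [List.length_tails]; omega
    have h1 : (t.tails.map (fun v => (List.range (t.length + 1)).map
        (fun idx => lcpLen v (t.drop idx)))).getD p [] =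
        (List.range (t.length + 1)).map (fun idx => lcpLen (t.drop p) (t.drop idx)) := by
      rw [List.getD_eq_getElem?_getD, List.getElem?_eq_getElem (by simpa using hp')]
      simp [List.getElem_tails]
    rw [h1, List.getD_eq_getElem?_getD,
      List.getElem?_eq_getElem (by simp; omega)]
    simp
  have hfold : pvKmax (pvRows t t) i =
      ((List.range i).map (fun p => min (lcpLen (t.drop p) (t.drop i)) (i - p))).foldl max 0 := by
    rw [List.foldl_map]
    unfold pvKmax
    apply PySem.List.foldl_congr_mem
    intro acc p hp
    have hpi : p < i := List.mem_range.1 hp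
    dsimp only
    rw [hrows p hpi]
    split_ifs <;> omega
  rw [hfold]
  -- each candidate is an admissible length
  have hcand : ∀ p, p < i → min (lcpLen (t.drop p) (t.drop i)) (i - p) ≤ pvMM t i := by
    intro p hp
    set L := min (lcpLen (t.drop p) (t.drop i)) (i - p) with hL
    apply Nat.le_findGreatest
    · have h1 := lcpLen_le_right (t.drop p) (t.drop i)
      have h2 : (t.drop i).length = t.length - i := List.length_drop
      omega
    · unfold pvP
      have htk : (t.drop i).take L = (t.drop p).take L :=
        (take_eq_of_le_lcpLen (t.drop p) (t.drop i) L (Nat.min_le_left _ _)).symm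
      rw [htk]
      have hsplit : t.take i = t.take p ++ (t.drop p).take (i - p) := by
        rw [← List.take_add]
        congr 1; omega
      have hpre : (t.drop p).take L <+: (t.drop p).take (i - p) := by
        apply List.prefix_take_iff.2
        refine ⟨List.take_prefix _ _, ?_⟩
        rw [List.length_take]
        have h3 := Nat.min_le_right L (t.drop p).length
        have h4 := Nat.min_le_right (lcpLen (t.drop p) (t.drop i)) (i - p)
        omega
      have hsuf : (t.drop p).take (i - p) <:+ t.take i := ⟨t.take p, hsplit.symm⟩
      exact hpre.isInfix.trans hsuf.isInfix
  -- and the greatest admissible length is attained by some candidate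
  have hattain : pvMM t i ≤ ((List.range i).map
      (fun p => min (lcpLen (t.drop p) (t.drop i)) (i - p))).foldl max 0 := by
    by_cases hz : pvMM t i = 0
    · omega
    · have hPmm : pvP t i (pvMM t i) := Nat.findGreatest_of_ne_zero rfl hz
      have hmb : pvMM t i ≤ t.length - i := Nat.findGreatest_le _
      obtain ⟨u, v, huv⟩ := hPmm
      set mm := pvMM t i with hmmdef
      set p := u.length with hpdef
      have hseglen : ((t.drop i).take mm).length = mm := by
        rw [List.length_take, List.length_drop]; omega
      have hti : (t.take i).length = i := by
        rw [List.length_take]; omega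
      have hsum : p + mm + v.length = i := by
        have hc := congrArg List.length huv
        simp only [List.length_append, hseglen, hti] at hc
        omega
      have hpi : p < i := by omega
      have hdropp : t.drop p = (t.drop i).take mm ++ v ++ t.drop i := by
        have ht : t = t.take i ++ t.drop i := (List.take_append_drop i t).symm
        calc t.drop p = (t.take i ++ t.drop i).drop p := by rw [← ht]
          _ = (t.take i).drop p ++ t.drop i := by
              rw [List.drop_append_of_le_length (by omega)]
          _ = ((u ++ ((t.drop i).take mm ++ v)).drop p) ++ t.drop i := by
              rw [← List.append_assoc, ← huv]
          _ = (t.drop i).take mm ++ v ++ t.drop i := by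
              rw [List.drop_left' hpdef.symm, List.append_assoc]
      have htakes : (t.drop p).take mm = (t.drop i).take mm := by
        rw [hdropp, List.append_assoc, List.take_left' hseglen]
      have hlcp : mm ≤ lcpLen (t.drop p) (t.drop i) := by
        apply le_lcpLen_of_take_eq mm (t.drop p) (t.drop i) htakes
        rw [List.length_drop]; omega
      have hmem : min (lcpLen (t.drop p) (t.drop i)) (i - p) ∈
          (List.range i).map (fun p => min (lcpLen (t.drop p) (t.drop i)) (i - p)) :=
        List.mem_map.2 ⟨p, List.mem_range.2 hpi, rfl⟩
      have hle := (PySem.List.le_foldl_max ((List.range i).map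
        (fun p => min (lcpLen (t.drop p) (t.drop i)) (i - p))) 0).2 _ hmem
      omega
  have hub : ((List.range i).map
      (fun p => min (lcpLen (t.drop p) (t.drop i)) (i - p))).foldl max 0 ≤ pvMM t i := by
    rcases PySem.List.foldl_max_mem ((List.range i).map
      (fun p => min (lcpLen (t.drop p) (t.drop i)) (i - p))) 0 with h | h
    · omega
    · obtain ⟨p, hp, hval⟩ := List.mem_map.1 h
      rw [← hval]
      exact hcand p (List.mem_range.1 hp)
  omega

theorem loops_eq (a b : Int) (t : List Char) :
    ∀ fuel cost i m, pvLoopA a b t fuel cost i m = pvLoopB a b t (pvRows t t) fuel cost i := by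
  intro fuel
  induction fuel with
  | zero => intro cost i m; rfl
  | succ fuel ih =>
    intro cost i m
    by_cases hi : i < t.length
    · have hlen : (pvInnerA t i (i + 1) m).length = pvKmax (pvRows t t) i := by
        rw [kmax_eq t i hi]
        apply innerA_aux t i hi (t.length + 1) (i + 1) m (by omega) le_rfl (by omega)
        · intro L hL
          have hL0 : L = 0 := by omega
          rw [hL0]
          exact List.nil_infix
        · right; rfl
      simp only [pvLoopA, pvLoopB, if_pos hi]
      rw [hlen]
      split
      · exact ih _ _ _
      · exact ih _ _ _
    · simp only [pvLoopA, pvLoopB, if_neg hi]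

-- ===== VERDICT (by name: the statement is the Claim_ definition above) =====
theorem build_a_string_spec : Claim_equal_build_a_string := by
  intro a b s _
  unfold Spec_build_a_string build_a_string build_a_string_alt
  exact loops_eq a b s.toList (s.toList.length + 1) a 1 []
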